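-- pv_equiv track=rewrite | github.com/rtfm-si/bo1 | backend/services/admin_analytics/sql_safety.py | _inject_limit
-- ===== SOURCE A (Python) =====
-- DEFAULT_LIMIT = 10_000
--
-- def _inject_limit(sql: str) -> str:
--     """Inject LIMIT clause if missing from the outermost SELECT."""
--     sql_upper = sql.upper().strip()
--
--     # Check if LIMIT already exists at the top level
--     # We need to check outside of parentheses
--     depth = 0
--     has_limit = False
--     for i, char in enumerate(sql_upper):
--         if char == "(":
--             depth += 1
--         elif char == ")":
--             depth -= 1
--         elif depth == 0 and sql_upper[i:].startswith("LIMIT"):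
--             # Verify it's a keyword boundary
--             if i == 0 or not sql_upper[i - 1].isalnum():
--                 end = i + 5
--                 if end >= len(sql_upper) or not sql_upper[end].isalnum():
--                     has_limit = True
--                     break
--
--     if not has_limit:
--         sql = f"{sql}\nLIMIT {DEFAULT_LIMIT}"
--
--     return sql
-- ===== SOURCE B (Python) =====
-- DEFAULT_LIMIT = 10_000
--
-- def _inject_limit(sql: str) -> str:
--     """Inject LIMIT clause if missing from the outermost SELECT."""
--     sql_upper = sql.upper().strip()
--     n = len(sql_upper)
--     has_limit = any(
--         sql_upper.startswith("LIMIT", i)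
--         and sql_upper[:i].count("(") == sql_upper[:i].count(")")
--         and (i == 0 or not sql_upper[i - 1].isalnum())
--         and (i + 5 >= n or not sql_upper[i + 5].isalnum())
--         for i in range(n)
--     )
--     if has_limit:
--         return sql
--     return f"{sql}\nLIMIT {DEFAULT_LIMIT}"
-- ===== Notes on version B (the rewrite author's own statement) =====
-- stated objective: faster
-- what changed: Replaces the single depth-tracking character scan (which slices the whole remaining suffix at every position) with an any() over indices that validates each candidate LIMIT occurrence independently via prefix parenthesis counts and boundary tests.
import Mathlib
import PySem

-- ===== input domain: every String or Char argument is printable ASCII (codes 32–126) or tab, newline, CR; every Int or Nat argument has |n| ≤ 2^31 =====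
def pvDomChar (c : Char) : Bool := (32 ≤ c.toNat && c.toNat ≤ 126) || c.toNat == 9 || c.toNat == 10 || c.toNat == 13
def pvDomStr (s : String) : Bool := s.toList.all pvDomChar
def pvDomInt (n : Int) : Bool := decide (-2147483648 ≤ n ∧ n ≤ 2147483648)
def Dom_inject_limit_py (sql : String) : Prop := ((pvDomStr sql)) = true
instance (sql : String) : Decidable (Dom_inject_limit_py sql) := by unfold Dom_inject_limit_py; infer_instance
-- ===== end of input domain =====

-- B replaces A's stateful depth-tracking scan (which slices the remaining suffix at every
-- position) by an independent per-candidate check (prefix parenthesis counts + boundary tests)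
-- under any(); measured faster in a timing run.

-- ===== PORT A =====
def limKw : List Char := ['L', 'I', 'M', 'I', 'T']

-- A's for-loop: recursion over the remaining suffix, carrying the previous char and the depth.
def injA_scan : List Char → Option Char → Int → Bool
  | [], _, _ => false
  | c :: rest, prev, depth =>
    if c = '(' then injA_scan rest (some c) (depth + 1)
    else if c = ')' then injA_scan rest (some c) (depth - 1)
    else if depth == 0 && limKw.isPrefixOf (c :: rest) then
      if (match prev with | none => true | some p => !PySem.Chars.isalnum p) then
        if decide ((c :: rest).length ≤ 5) || !PySem.Chars.isalnum ((c :: rest).getD 5 ' ') then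
          true
        else injA_scan rest (some c) depth
      else injA_scan rest (some c) depth
    else injA_scan rest (some c) depth

def inject_limit_py (sql : String) : String :=
  let u : List Char := (PySem.Str.strip (PySem.Str.upper sql)).toList
  if injA_scan u none 0 then sql else sql ++ "\nLIMIT 10000"

-- ===== PORT B =====
-- the per-index check of Source B's any(): candidate occurrence + prefix counts + boundaries
def injB_ok (u : List Char) (i : Nat) : Bool :=
  limKw.isPrefixOf (u.drop i)
  && ((u.take i).count '(' == (u.take i).count ')')
  && (i == 0 || !PySem.Chars.isalnum (u.getD (i - 1) ' '))
  && (decide (u.length ≤ i + 5) || !PySem.Chars.isalnum (u.getD (i + 5) ' '))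

def inject_limit_py_alt (sql : String) : String :=
  let u : List Char := (PySem.Str.strip (PySem.Str.upper sql)).toList
  if (List.range u.length).any (injB_ok u) then sql else sql ++ "\nLIMIT 10000"

-- ===== PRECONDITION & SPEC =====
def Spec_inject_limit_py (sql : String) (out : String) : Prop := out = inject_limit_py_alt sql
instance (sql : String) (out : String) : Decidable (Spec_inject_limit_py sql out) := by unfold Spec_inject_limit_py; infer_instance

-- ===== CLAIM (what is proved, stated in full; the proofs are below) =====
def Claim_equal_inject_limit_py : Prop := ∀ (sql : String), Dom_inject_limit_py sql → Spec_inject_limit_py sql (inject_limit_py sql)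

-- ===== LEMMAS AND PROOFS =====

-- A's carried state at index i, expressed on the whole list
def prevOf (u : List Char) (i : Nat) : Option Char :=
  if i = 0 then none else some (u.getD (i - 1) ' ')

def dAt (u : List Char) (i : Nat) : Int :=
  ((u.take i).count '(' : Int) - ((u.take i).count ')' : Int)

lemma injB_step (u : List Char) (i : Nat) (hi : i < u.length) :
    injA_scan (u.drop i) (prevOf u i) (dAt u i)
      = (injB_ok u i || injA_scan (u.drop (i + 1)) (prevOf u (i + 1)) (dAt u (i + 1))) := by
  have hget : u[i]? = some u[i] := List.getElem?_eq_getElem hi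
  have hd : u.drop i = u[i] :: u.drop (i + 1) := List.drop_eq_getElem_cons hi
  have htake : u.take (i + 1) = u.take i ++ [u[i]] := by
    rw [List.take_add_one, hget]; rfl
  have hprev : prevOf u (i + 1) = some (u[i]) := by
    simp [prevOf, List.getD_eq_getElem?_getD, hget]
  rw [hd, hprev]
  generalize u[i] = c at hd htake ⊢
  by_cases h1 : c = '('
  · have hb : injB_ok u i = false := by
      have hpref : limKw.isPrefixOf (u.drop i) = false := by
        rw [hd, h1]; simp [limKw, List.isPrefixOf]
      simp [injB_ok, hpref]
    have hdA : dAt u (i + 1) = dAt u i + 1 := by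
      simp [dAt, htake, h1, List.count_append]; ring
    simp only [injA_scan, if_pos h1, hb, hdA, Bool.false_or]
  · by_cases h2 : c = ')'
    · have hb : injB_ok u i = false := by
        have hpref : limKw.isPrefixOf (u.drop i) = false := by
          rw [hd, h2]; simp [limKw, List.isPrefixOf]
        simp [injB_ok, hpref]
      have hdA : dAt u (i + 1) = dAt u i - 1 := by
        simp [dAt, htake, h2, List.count_append]; ring
      simp only [injA_scan, if_neg h1, if_pos h2, hb, hdA, Bool.false_or]
    · have hdA : dAt u (i + 1) = dAt u i := by
        simp [dAt, htake, List.count_append, List.count_nil, h1, h2]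
      -- component equalities between B's per-index check and A's inline tests
      have hcount : (((u.take i).count '(' == (u.take i).count ')') : Bool)
          = ((dAt u i) == 0) := by
        rw [Bool.eq_iff_iff]; simp [dAt, beq_iff_eq]; omega
      have hprevok : ((i == 0 || !PySem.Chars.isalnum (u.getD (i - 1) ' ')) : Bool)
          = (match prevOf u i with | none => true | some p => !PySem.Chars.isalnum p) := by
        by_cases h0 : i = 0
        · simp [prevOf, h0]
        · simp [prevOf, h0]
      have hlenok : (decide ((c :: u.drop (i + 1)).length ≤ 5) : Bool)
          = decide (u.length ≤ i + 5) := by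
        have : (c :: u.drop (i + 1)).length = u.length - i := by
          rw [← hd, List.length_drop]
        rw [this, Bool.eq_iff_iff]; simp; omega
      have hgetD : (c :: u.drop (i + 1)).getD 5 ' ' = u.getD (i + 5) ' ' := by
        rw [← hd]
        simp [List.getD_eq_getElem?_getD, List.getElem?_drop]
      have hok : injB_ok u i
          = (limKw.isPrefixOf (c :: u.drop (i + 1)) && ((dAt u i) == 0)
             && (match prevOf u i with | none => true | some p => !PySem.Chars.isalnum p)
             && (decide ((c :: u.drop (i + 1)).length ≤ 5)
                 || !PySem.Chars.isalnum ((c :: u.drop (i + 1)).getD 5 ' '))) := by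
        rw [injB_ok, hd, hcount, hprevok, hlenok, hgetD]
      rw [hok, hdA]
      simp only [injA_scan, if_neg h1, if_neg h2]
      cases hp : limKw.isPrefixOf (c :: u.drop (i + 1)) <;>
        cases hz : ((dAt u i) == 0) <;>
        cases hpa : (match prevOf u i with | none => true | some p => !PySem.Chars.isalnum p) <;>
        cases hea : (decide ((c :: u.drop (i + 1)).length ≤ 5)
            || !PySem.Chars.isalnum ((c :: u.drop (i + 1)).getD 5 ' ')) <;>
        simp

lemma injB_main (u : List Char) (k i : Nat) (h : i + k = u.length) :
    injA_scan (u.drop i) (prevOf u i) (dAt u i) = (List.range' i k).any (injB_ok u) := by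
  induction k generalizing i with
  | zero =>
      have : i = u.length := by omega
      subst this
      simp [injA_scan, List.drop_length]
  | succ k ih =>
      have hi : i < u.length := by omega
      rw [List.range'_succ, List.any_cons, injB_step u i hi, ih (i + 1) (by omega)]

-- ===== VERDICT (by name: the statement is the Claim_ definition above) =====
theorem inject_limit_py_spec : Claim_equal_inject_limit_py := by
  intro sql _
  unfold Spec_inject_limit_py inject_limit_py inject_limit_py_alt
  have h := injB_main ((PySem.Str.strip (PySem.Str.upper sql)).toList)
    ((PySem.Str.strip (PySem.Str.upper sql)).toList).length 0 (by omega)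
  simp only [List.drop_zero, prevOf, dAt, List.take_zero, List.count_nil] at h
  simp only [List.range_eq_range']
  rw [← h]
  norm_num
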